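-- pv_equiv track=rewrite | github.com/GSYBD/SXLNLP | 黄雨石/week4/homework_readme.py | all_cut2
-- ===== SOURCE A (Python) =====
-- def all_cut2(sentence, Dict):
--     def _cut(sentence, Dict, memo):
--         if sentence in memo:
--             return memo[sentence]
--
--         if not sentence:
--             return [[]]  # Return a list containing an empty list to signify end of sentence
--
--         result = []
--         max_length = max(len(word) for word in Dict)  # Find the length of the longest word in the dictionary
--
--         for i in range(1, min(max_length + 1, len(sentence) + 1)):
--             word = sentence[:i]
--             if word in Dict:
--                 for sublist in _cut(sentence[i:], Dict, memo):
--                     result.append([word] + sublist)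
--
--         memo[sentence] = result
--         return result
--
--     memo = {}
--     return _cut(sentence, Dict, memo)
-- ===== SOURCE B (Python) =====
-- def all_cut2(sentence, Dict):
--     # Bottom-up DP over suffix start positions instead of memoized recursion.
--     n = len(sentence)
--     seg = [None] * (n + 1)
--     seg[n] = [[]]
--     if n == 0:
--         return seg[0]
--     max_length = max((len(w) for w in Dict), default=0)
--     words = set(Dict)
--     for j in range(n - 1, -1, -1):
--         res = []
--         for i in range(1, min(max_length, n - j) + 1):
--             word = sentence[j:j + i]
--             if word in words:
--                 for tail in seg[j + i]:
--                     res.append([word] + tail)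
--         seg[j] = res
--     return seg[0]
-- ===== Notes on version B (the rewrite author's own statement) =====
-- stated objective: alternative
-- what changed: Replaces A's memoized top-down recursion over suffix strings with a bottom-up dynamic program that fills a segmentation table from the end of the sentence to the front.
import Mathlib
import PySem

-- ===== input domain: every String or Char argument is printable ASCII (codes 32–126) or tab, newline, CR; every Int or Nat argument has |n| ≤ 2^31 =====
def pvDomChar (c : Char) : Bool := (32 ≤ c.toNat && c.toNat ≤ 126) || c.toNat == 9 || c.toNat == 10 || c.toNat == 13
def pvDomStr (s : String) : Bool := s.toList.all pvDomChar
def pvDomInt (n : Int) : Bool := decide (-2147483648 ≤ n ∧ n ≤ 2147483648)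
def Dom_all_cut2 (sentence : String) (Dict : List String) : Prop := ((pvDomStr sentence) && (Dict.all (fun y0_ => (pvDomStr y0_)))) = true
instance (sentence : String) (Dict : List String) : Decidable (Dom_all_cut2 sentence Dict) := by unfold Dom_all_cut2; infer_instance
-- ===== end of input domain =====

-- B replaces A's memoized top-down recursion by a bottom-up DP over suffix start positions (objective: alternative decomposition, same results in the same order).

-- ===== PORT A =====
-- max(len(word) for word in Dict); the [] case raises ValueError in Python (excluded by Pre_ when reached), total form returns 0 there.
def pyMaxLen (Dict : List String) : Nat :=
  match Dict with
  | [] => 0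
  | w :: ws => ws.foldl (fun a x => max a x.length) w.length

mutual
-- _cut(sentence, Dict, memo); the sentence is carried as List Char, slices sentence[:i]/sentence[i:] are take/drop (exact: 0 ≤ i ≤ len).
def cutA (Dict : List String) (s : List Char) (memo : PySem.Dict String (List (List String))) :
    List (List String) × PySem.Dict String (List (List String)) :=
  match memo.get? (String.ofList s) with
  | some v => (v, memo)
  | none =>
    if hs : s = [] then ([[]], memo)
    else
      let p := cutLoop Dict s 1 (min (pyMaxLen Dict + 1) (s.length + 1)) [] memo (by omega) hs
      (p.1, p.2.insert (String.ofList s) p.1)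
termination_by (s.length, 1, 0)
decreasing_by
  simp_wf
  exact Prod.Lex.right _ (Prod.Lex.left _ _ (by omega))

-- the 'for i in range(1, min(max_length+1, len(sentence)+1))' loop with accumulator 'result'
def cutLoop (Dict : List String) (s : List Char) (i stop : Nat) (acc : List (List String))
    (memo : PySem.Dict String (List (List String))) (hi : 1 ≤ i) (hs : s ≠ []) :
    List (List String) × PySem.Dict String (List (List String)) :=
  if h : i < stop then
    let word := String.ofList (s.take i)
    if word ∈ Dict then
      let q := cutA Dict (s.drop i) memo
      cutLoop Dict s (i + 1) stop (acc ++ q.1.map (fun t => word :: t)) q.2 (by omega) hs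
    else
      cutLoop Dict s (i + 1) stop acc memo (by omega) hs
  else (acc, memo)
termination_by (s.length, 0, stop - i)
decreasing_by
  · simp_wf
    have h0 : 0 < s.length := List.length_pos_of_ne_nil hs
    exact Prod.Lex.left _ _ (by omega)
  · exact Prod.Lex.right _ (Prod.Lex.right _ (by omega))
  · exact Prod.Lex.right _ (Prod.Lex.right _ (by omega))
end

def all_cut2 (sentence : String) (Dict : List String) : List (List String) :=
  (cutA Dict sentence.toList PySem.Dict.empty).1

-- ===== PORT B =====
-- seg built back-to-front: (segs words M s) is [seg[j], seg[j+1], ..., seg[n]] for the suffix s starting at position j.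
def segs (words : PySem.Set String) (M : Nat) : List Char → List (List (List String))
  | [] => [[[]]]
  | c :: rest =>
    let prev := segs words M rest
    let res := (List.range' 1 (min M (rest.length + 1))).foldl
      (fun acc i =>
        let word := String.ofList ((c :: rest).take i)
        if PySem.Set.contains words word then acc ++ (prev.getD (i - 1) []).map (fun t => word :: t)
        else acc) []
    res :: prev

def all_cut2_alt (sentence : String) (Dict : List String) : List (List String) :=
  let s := sentence.toList
  if s.length = 0 then [[]]
  else (segs (PySem.Set.ofList Dict) (pyMaxLen Dict) s).headD []

-- ===== PRECONDITION & SPEC =====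
-- Pre_ excludes only inputs where Python A raises ValueError (max() of an empty generator): non-empty sentence with empty Dict.
def Pre_all_cut2 (sentence : String) (Dict : List String) : Prop := sentence = "" ∨ Dict ≠ []
instance (sentence : String) (Dict : List String) : Decidable (Pre_all_cut2 sentence Dict) := by unfold Pre_all_cut2; infer_instance
def pvWitness_all_cut2 : String × List String := ("aab", ["a", "ab", "b"])

def Spec_all_cut2 (sentence : String) (Dict : List String) (out : List (List String)) : Prop := out = all_cut2_alt sentence Dict
instance (sentence : String) (Dict : List String) (out : List (List String)) : Decidable (Spec_all_cut2 sentence Dict out) := by unfold Spec_all_cut2; infer_instance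

-- ===== CLAIM (what is proved, stated in full; the proofs are below) =====
def Claim_equal_all_cut2 : Prop := ∀ (sentence : String) (Dict : List String), Dom_all_cut2 sentence Dict → Pre_all_cut2 sentence Dict → Spec_all_cut2 sentence Dict (all_cut2 sentence Dict)

-- ===== LEMMAS AND PROOFS =====

-- the common mathematical recurrence both ports compute
def fcut (Dict : List String) (M : Nat) (s : List Char) : List (List String) :=
  if hs : s = [] then [[]]
  else
    (List.range' 1 (min M s.length)).attach.flatMap (fun k =>
      if String.ofList (s.take k.1) ∈ Dict then
        (fcut Dict M (s.drop k.1)).map (fun t => String.ofList (s.take k.1) :: t)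
      else [])
termination_by s.length
decreasing_by
  have hk := List.mem_range'_1.mp k.2
  have h0 : 0 < s.length := List.length_pos_of_ne_nil hs
  simp only [List.length_drop]
  omega

theorem fcut_nil (Dict : List String) (M : Nat) : fcut Dict M [] = [[]] := by
  rw [fcut]; simp

theorem fcut_ne (Dict : List String) (M : Nat) (s : List Char) (hs : s ≠ []) :
    fcut Dict M s = (List.range' 1 (min M s.length)).flatMap (fun k =>
      if String.ofList (s.take k) ∈ Dict then
        (fcut Dict M (s.drop k)).map (fun t => String.ofList (s.take k) :: t)
      else []) := by
  rw [fcut]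
  simp [hs, List.flatMap]

def GoodMemo (Dict : List String) (M : Nat) (memo : PySem.Dict String (List (List String))) : Prop :=
  ∀ t v, memo.get? (String.ofList t) = some v → v = fcut Dict M t

theorem ofList_inj {a b : List Char} (h : String.ofList a = String.ofList b) : a = b := by
  have := congrArg String.toList h; simpa using this

theorem contains_ofList_eq (Dict : List String) (w : String) :
    PySem.Set.contains (PySem.Set.ofList Dict) w = decide (w ∈ Dict) := by
  by_cases hw : w ∈ Dict
  · simp [hw, PySem.Set.mem_ofList]
  · simp only [hw, decide_false]
    rw [← Bool.not_eq_true]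
    intro h
    exact hw ((PySem.Set.mem_ofList _ _).mp ((PySem.Set.contains_iff _ _).mp h))

theorem foldl_ite_append {α β : Type} (p : α → Bool) (g : α → List β) :
    ∀ (l : List α) (acc : List β),
      l.foldl (fun a x => if p x then a ++ g x else a) acc = acc ++ l.flatMap (fun x => if p x then g x else []) := by
  intro l
  induction l with
  | nil => simp
  | cons x xs ih =>
    intro acc
    simp only [List.foldl_cons, List.flatMap_cons]
    by_cases hp : p x <;> simp [hp, ih, List.append_assoc]

theorem cutLoop_correct (Dict : List String) (n : Nat)
    (ihA : ∀ s : List Char, s.length ≤ n → ∀ memo, GoodMemo Dict (pyMaxLen Dict) memo →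
      (cutA Dict s memo).1 = fcut Dict (pyMaxLen Dict) s ∧ GoodMemo Dict (pyMaxLen Dict) (cutA Dict s memo).2) :
    ∀ (k : Nat) (s : List Char) (hs : s ≠ []) (hL : s.length ≤ n + 1) (i stop : Nat) (hi : 1 ≤ i)
      (hk : stop - i ≤ k) (acc : List (List String)) (memo : PySem.Dict String (List (List String)))
      (hm : GoodMemo Dict (pyMaxLen Dict) memo),
      (cutLoop Dict s i stop acc memo hi hs).1 =
        acc ++ (List.range' i (stop - i)).flatMap (fun j =>
          if String.ofList (s.take j) ∈ Dict then
            (fcut Dict (pyMaxLen Dict) (s.drop j)).map (fun t => String.ofList (s.take j) :: t)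
          else []) ∧
      GoodMemo Dict (pyMaxLen Dict) (cutLoop Dict s i stop acc memo hi hs).2 := by
  intro k
  induction k with
  | zero =>
    intro s hs hL i stop hi hk acc memo hm
    have h : ¬ i < stop := by omega
    rw [cutLoop, dif_neg h]
    have h0 : stop - i = 0 := by omega
    simp [h0]
    exact hm
  | succ k ihk =>
    intro s hs hL i stop hi hk acc memo hm
    rw [cutLoop]
    by_cases h : i < stop
    · rw [dif_pos h]
      simp only []
      have hrange : stop - i = (stop - (i + 1)) + 1 := by omega
      by_cases hw : String.ofList (s.take i) ∈ Dict
      · rw [if_pos hw]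
        have hdl : (s.drop i).length ≤ n := by
          have := List.length_pos_of_ne_nil hs
          simp only [List.length_drop]; omega
        obtain ⟨hq1, hq2⟩ := ihA (s.drop i) hdl memo hm
        obtain ⟨hr1, hr2⟩ := ihk s hs hL (i + 1) stop (by omega) (by omega) _ _ hq2
        refine ⟨?_, hr2⟩
        rw [hr1, hq1, hrange, List.range'_succ, List.flatMap_cons, if_pos hw]
        simp [List.append_assoc]
      · rw [if_neg hw]
        obtain ⟨hr1, hr2⟩ := ihk s hs hL (i + 1) stop (by omega) (by omega) acc memo hm
        refine ⟨?_, hr2⟩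
        rw [hr1, hrange, List.range'_succ, List.flatMap_cons, if_neg hw]
        simp
    · rw [dif_neg h]
      have h0 : stop - i = 0 := by omega
      simp [h0]
      exact hm

theorem cutA_correct (Dict : List String) :
    ∀ (n : Nat) (s : List Char), s.length ≤ n → ∀ memo, GoodMemo Dict (pyMaxLen Dict) memo →
      (cutA Dict s memo).1 = fcut Dict (pyMaxLen Dict) s ∧ GoodMemo Dict (pyMaxLen Dict) (cutA Dict s memo).2 := by
  intro n
  induction n with
  | zero =>
    intro s hL memo hm
    have hs : s = [] := by cases s with | nil => rfl | cons a l => simp at hL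
    subst hs
    rw [cutA]
    cases hget : memo.get? (String.ofList []) with
    | some v =>
      simp only [hget]
      exact ⟨hm [] v hget, hm⟩
    | none =>
      simp only [hget]
      refine ⟨?_, ?_⟩
      · simp [fcut_nil]
      · simpa using hm
  | succ n ih =>
    intro s hL memo hm
    rw [cutA]
    cases hget : memo.get? (String.ofList s) with
    | some v =>
      simp only [hget]
      exact ⟨hm s v hget, hm⟩
    | none =>
      simp only [hget]
      by_cases hs : s = []
      · subst hs
        refine ⟨?_, ?_⟩
        · simp [fcut_nil]
        · simpa using hm
      · rw [dif_neg hs]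
        have hL1 : 1 ≤ s.length := List.length_pos_of_ne_nil hs
        obtain ⟨h1, h2⟩ := cutLoop_correct Dict n ih
          (min (pyMaxLen Dict + 1) (s.length + 1) - 1) s hs hL 1
          (min (pyMaxLen Dict + 1) (s.length + 1)) (by omega) (by omega) [] memo hm
        have hstop : min (pyMaxLen Dict + 1) (s.length + 1) - 1 = min (pyMaxLen Dict) s.length := by omega
        have hres : (cutLoop Dict s 1 (min (pyMaxLen Dict + 1) (s.length + 1)) [] memo (by omega) hs).1
            = fcut Dict (pyMaxLen Dict) s := by
          rw [h1, fcut_ne Dict (pyMaxLen Dict) s hs, hstop, List.nil_append]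
        constructor
        · exact hres
        · intro t v hv
          rw [PySem.Dict.get?_insert] at hv
          by_cases heq : String.ofList t = String.ofList s
          · rw [if_pos heq] at hv
            have ht : t = s := ofList_inj heq
            subst ht
            exact (Option.some.inj hv).symm.trans hres
          · rw [if_neg heq] at hv
            exact h2 t v hv

theorem segs_correct (Dict : List String) (s : List Char) :
    segs (PySem.Set.ofList Dict) (pyMaxLen Dict) s =
      (List.range (s.length + 1)).map (fun j => fcut Dict (pyMaxLen Dict) (s.drop j)) := by
  induction s with
  | nil => simp [segs, fcut_nil, List.range_succ]
  | cons c rest ihr =>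
    simp only [segs]
    have hrange : List.range (rest.length + 1 + 1) = 0 :: List.range' 1 (rest.length + 1) := by
      rw [List.range_eq_range', List.range'_succ]
    rw [List.length_cons, hrange, List.map_cons]
    have htail : (List.range' 1 (rest.length + 1)).map (fun j => fcut Dict (pyMaxLen Dict) ((c :: rest).drop j))
        = (List.range (rest.length + 1)).map (fun j => fcut Dict (pyMaxLen Dict) (rest.drop j)) := by
      rw [List.range'_eq_map_range, List.map_map]
      exact List.map_congr_left (fun j _ => by simp [Nat.add_comm 1 j, List.drop_succ_cons])
    rw [htail, ← ihr]
    congr 1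
    -- head entry: the foldl loop over word lengths equals fcut on c :: rest
    rw [List.drop_zero, foldl_ite_append, List.nil_append,
      fcut_ne Dict (pyMaxLen Dict) (c :: rest) (by simp), List.length_cons]
    apply List.flatMap_congr
    intro i hi
    have hmem := List.mem_range'_1.mp hi
    rw [contains_ofList_eq]
    by_cases hw : String.ofList ((c :: rest).take i) ∈ Dict
    · simp only [hw, decide_true, if_true, if_pos hw]
      have h1 : i - 1 < rest.length + 1 := by omega
      rw [ihr]
      simp only [List.getD_eq_getElem?_getD, List.getElem?_map, List.getElem?_range h1,
        Option.map_some, Option.getD_some]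
      have hi1 : i = (i - 1) + 1 := by omega
      rw [hi1, List.drop_succ_cons]
      simp
    · simp [hw]

-- ===== VERDICT (by name: the statement is the Claim_ definition above) =====
theorem all_cut2_spec : Claim_equal_all_cut2 := by
  intro sentence Dict _ _
  show all_cut2 sentence Dict = all_cut2_alt sentence Dict
  simp only [all_cut2, all_cut2_alt]
  have hm0 : GoodMemo Dict (pyMaxLen Dict) PySem.Dict.empty := by
    intro t v h
    simp [PySem.Dict.get?_empty] at h
  have hA := (cutA_correct Dict sentence.toList.length sentence.toList le_rfl PySem.Dict.empty hm0).1
  by_cases hs : sentence.toList.length = 0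
  · rw [if_pos hs, hA, List.length_eq_zero_iff.mp hs, fcut_nil]
  · rw [if_neg hs, hA, segs_correct]
    have hr : List.range (sentence.toList.length + 1) = 0 :: List.range' 1 sentence.toList.length := by
      rw [List.range_eq_range', List.range'_succ]
    rw [hr]
    simp
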